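-- pv_equiv track=rewrite | github.com/nikilagar/OCR | downTmp/SauravFeatures.py | crossings
-- ===== SOURCE A (Python) =====
-- def crossings(img):
--     cros = [0, 0, 0, 0]
--     lenx, leny = len(img), len(img[0])
--     state = 1
--     for i in range(0, lenx):
--         j = int(leny / 2)
--         if (img[i][j] == 0 and state == 1):
--             cros[0] += 1
--             state = 0
--         elif img[i][j] == 255 and state == 0:
--             cros[0] += 1
--             state = 1
--     state = 1
--     for j in range(0, leny):
--         i = int(lenx / 2)
--         if (img[i][j] == 0 and state == 1):
--             cros[1] += 1
--             state = 0
--         elif img[i][j] == 255 and state == 0: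
--             cros[1] += 1
--             state = 1
--     j = 0
--     state = 1
--     for i in range(0, lenx):
--         if (img[i][j] == 0 and state == 1):
--             cros[2] += 1
--             state = 0
--         elif img[i][j] == 255 and state == 0:
--             cros[2] += 1
--             state = 1
--         j += 1
--     j = 0
--     state = 1
--     for i in range(lenx - 1, -1, -1):
--         if (img[i][j] == 0 and state == 1):
--             cros[3] += 1
--             state = 0
--         elif img[i][j] == 255 and state == 0:
--             cros[3] += 1
--             state = 1
--         j += 1
--     return cros
-- ===== SOURCE B (Python) =====
-- def count(line):
--     f = [p for p in line if p == 0 or p == 255]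
--     runs = sum(1 for k in range(len(f)) if f[k] == 0 and (k == 0 or f[k - 1] == 255))
--     return 2 * runs - (1 if f and f[-1] == 0 else 0)
--
-- def crossings(img):
--     lenx, leny = len(img), len(img[0])
--     lines = [
--         [img[i][leny // 2] for i in range(lenx)],
--         [img[lenx // 2][j] for j in range(leny)],
--         [img[i][i] for i in range(lenx)],
--         [img[lenx - 1 - k][k] for k in range(lenx)],
--     ]
--     return [count(line) for line in lines]
-- ===== Notes on version B (the rewrite author's own statement) =====
-- stated objective: simpler
-- what changed: Replaces A's four inline two-state transition machines with explicit line extraction plus a closed-form segment count: filter each line to {0,255}, count black-run starts by the index test f[k]==0 and (k==0 or f[k-1]==255), and return 2*runs minus 1 if the filtered line ends black.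
import Mathlib
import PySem

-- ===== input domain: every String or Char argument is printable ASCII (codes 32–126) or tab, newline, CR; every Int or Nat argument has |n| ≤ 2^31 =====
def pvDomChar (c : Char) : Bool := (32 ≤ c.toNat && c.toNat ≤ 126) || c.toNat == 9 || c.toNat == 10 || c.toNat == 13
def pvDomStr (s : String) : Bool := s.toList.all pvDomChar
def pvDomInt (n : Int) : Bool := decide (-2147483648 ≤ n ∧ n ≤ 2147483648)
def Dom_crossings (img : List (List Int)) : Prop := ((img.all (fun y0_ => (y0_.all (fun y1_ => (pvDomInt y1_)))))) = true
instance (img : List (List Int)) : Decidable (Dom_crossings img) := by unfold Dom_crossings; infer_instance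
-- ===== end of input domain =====

-- B replaces A's four inline transition state machines by a closed-form segment count:
-- filter each scan line to {0,255} and return 2 * (number of black-run starts, detected by
-- an index test f[k]=0 ∧ (k=0 ∨ f[k-1]=255)) minus 1 if the filtered line ends black.
-- Same cost; chosen for a plainer decomposition.

-- shared indexing helper: img[i][j] (outside Pre_ the default is never reached)
def pyAt (img : List (List Int)) (i j : Int) : Int :=
  PySem.List.pyGetD (PySem.List.pyGetD img i []) j 0

-- ===== PORT A =====
-- one iteration of A's repeated if/elif state-machine body
def stepA (s : Int × Int) (p : Int) : Int × Int :=
  if p == 0 && s.2 == 1 then (s.1 + 1, 0)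
  else if p == 255 && s.2 == 0 then (s.1 + 1, 1)
  else s

def crossings (img : List (List Int)) : List Int :=
  let lenx : Int := img.length
  let leny : Int := (PySem.List.pyGetD img 0 []).length
  let c0 := ((PySem.List.pyRange 0 lenx 1).foldl
      (fun s i => stepA s (pyAt img i (PySem.Int.floordiv leny 2))) ((0:Int), (1:Int))).1
  let c1 := ((PySem.List.pyRange 0 leny 1).foldl
      (fun s j => stepA s (pyAt img (PySem.Int.floordiv lenx 2) j)) ((0:Int), (1:Int))).1
  let c2 := ((PySem.List.pyRange 0 lenx 1).foldl
      (fun sj i => (stepA sj.1 (pyAt img i sj.2), sj.2 + 1)) (((0:Int), (1:Int)), (0:Int))).1.1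
  let c3 := ((PySem.List.pyRange (lenx - 1) (-1) (-1)).foldl
      (fun sj i => (stepA sj.1 (pyAt img i sj.2), sj.2 + 1)) (((0:Int), (1:Int)), (0:Int))).1.1
  [c0, c1, c2, c3]

-- ===== PORT B =====
-- Source B's count(line): filter to {0,255}, count black-run starts by index test, closed form
def runStarts (f : List Int) : Nat :=
  (List.range f.length).countP (fun k => f.getD k 0 == 0 && (k == 0 || f.getD (k - 1) 0 == 255))

def lineCount (line : List Int) : Int :=
  let f := line.filter (fun p => p == 0 || p == 255)
  2 * (runStarts f : Int) - (if f ≠ [] ∧ f.getLast? = some 0 then 1 else 0)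

def crossings_alt (img : List (List Int)) : List Int :=
  let lenx : Int := img.length
  let leny : Int := (PySem.List.pyGetD img 0 []).length
  let lines : List (List Int) :=
    [ (PySem.List.pyRange 0 lenx 1).map (fun i => pyAt img i (PySem.Int.floordiv leny 2)),
      (PySem.List.pyRange 0 leny 1).map (fun j => pyAt img (PySem.Int.floordiv lenx 2) j),
      (PySem.List.pyRange 0 lenx 1).map (fun i => pyAt img i i),
      (PySem.List.pyRange 0 lenx 1).map (fun k => pyAt img (lenx - 1 - k) k) ]
  lines.map lineCount

-- ===== PRECONDITION & SPEC =====
-- Pre_ excludes exactly the inputs where Python A raises IndexError: empty img, or a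
-- row/column/diagonal access out of range (B raises on the same inputs).
def Pre_crossings (img : List (List Int)) : Prop :=
  img ≠ [] ∧
  (∀ r ∈ img, (img.headD []).length / 2 < r.length) ∧
  (img.headD []).length ≤ (img.getD (img.length / 2) []).length ∧
  (∀ i < img.length, i < (img.getD i []).length) ∧
  (∀ k < img.length, k < (img.getD (img.length - 1 - k) []).length)

instance (img : List (List Int)) : Decidable (Pre_crossings img) := by
  unfold Pre_crossings; infer_instance

def pvWitness_crossings : List (List Int) := [[0, 255], [255, 0]]

def Spec_crossings (img : List (List Int)) (out : List Int) : Prop := out = crossings_alt img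
instance (img : List (List Int)) (out : List Int) : Decidable (Spec_crossings img out) := by unfold Spec_crossings; infer_instance

-- ===== CLAIM (what is proved, stated in full; the proofs are below) =====
def Claim_equal_crossings : Prop := ∀ (img : List (List Int)), Dom_crossings img → Pre_crossings img → Spec_crossings img (crossings img)

-- ===== LEMMAS AND PROOFS =====

-- recursive characterisation of runStarts: run-start count with explicit previous value
def runsR (p : Int) : List Int → Nat
  | [] => 0
  | x :: g => (if x == 0 && p == 255 then 1 else 0) + runsR x g

-- end-correction: 1 if the line ends black
def endB (g : List Int) : Int := if g.getLast? = some 0 then 1 else 0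

lemma countP_shift (g : List Int) : ∀ (prev : Int),
    (List.range g.length).countP (fun k => g.getD k 0 == 0 && (prev :: g).getD k 0 == 255)
      = runsR prev g := by
  induction g with
  | nil => intro prev; simp [runsR]
  | cons x t ih =>
    intro prev
    simp only [List.length_cons, List.range_succ_eq_map, List.countP_cons, List.countP_map]
    have hc : ((fun k => (x :: t).getD k 0 == 0 && (prev :: x :: t).getD k 0 == 255) ∘ Nat.succ)
        = (fun k => t.getD k 0 == 0 && (x :: t).getD k 0 == 255) := rfl
    rw [hc, ih x]
    simp [runsR]
    split_ifs <;> simp_all <;> omega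

lemma runStarts_eq (f : List Int) : runStarts f = runsR 255 f := by
  rw [runStarts, ← countP_shift f 255]
  apply List.countP_congr
  intro k _
  cases k with
  | zero => simp
  | succ m => simp

lemma endB_cons (x : Int) (t : List Int) (h : t ≠ []) : endB (x :: t) = endB t := by
  rcases t with _ | ⟨y, u⟩
  · simp at h
  · simp [endB, List.getLast?_cons_cons]

-- A's state machine over a {0,255} line equals the closed form
lemma fold_closed (g : List Int) (hg : ∀ p ∈ g, p = 0 ∨ p = 255) : ∀ (c : Int),
    (g.foldl stepA (c, 1)).1 = c + 2 * runsR 255 g - endB g ∧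
    (g.foldl stepA (c, 0)).1 = c + 2 * runsR 0 g - endB g + (if g = [] then 0 else 1) := by
  induction g with
  | nil => intro c; simp [runsR, endB]
  | cons x t ih =>
    intro c
    have ht := fun p hp => hg p (List.mem_cons_of_mem x hp)
    have iht := ih ht
    rcases hg x List.mem_cons_self with hx | hx <;> subst hx
    · constructor
      · simp only [List.foldl_cons]
        rw [show stepA (c, 1) 0 = (c + 1, 0) by simp [stepA], (iht (c + 1)).2]
        rcases t with _ | ⟨y, u⟩
        · simp [runsR, endB]; omega
        · rw [endB_cons 0 (y :: u) (by simp)]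
          simp [runsR]
          ring
      · simp only [List.foldl_cons]
        rw [show stepA (c, 0) 0 = (c, 0) by simp [stepA], (iht c).2]
        rcases t with _ | ⟨y, u⟩
        · simp [runsR, endB]
        · rw [endB_cons 0 (y :: u) (by simp)]
          simp [runsR]
    · constructor
      · simp only [List.foldl_cons]
        rw [show stepA (c, 1) 255 = (c, 1) by simp [stepA], (iht c).1]
        rcases t with _ | ⟨y, u⟩
        · simp [runsR, endB]
        · rw [endB_cons 255 (y :: u) (by simp)]
          simp [runsR]
      · simp only [List.foldl_cons]
        rw [show stepA (c, 0) 255 = (c + 1, 1) by simp [stepA], (iht (c + 1)).1]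
        rcases t with _ | ⟨y, u⟩
        · simp [runsR, endB]
        · rw [endB_cons 255 (y :: u) (by simp)]
          simp [runsR]
          ring

-- non-{0,255} pixels are ignored by the state machine
lemma fold_filter (line : List Int) : ∀ (s : Int × Int),
    line.foldl stepA s = (line.filter (fun p => p == 0 || p == 255)).foldl stepA s := by
  induction line with
  | nil => intro s; simp
  | cons x t ih =>
    intro s
    by_cases h0 : x = 0
    · simp [h0, ih]
    · by_cases h255 : x = 255
      · simp [h255, ih]
      · simp [h0, h255, stepA, ih]

lemma line_eq (line : List Int) :
    lineCount line = (line.foldl stepA ((0:Int), (1:Int))).1 := by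
  rw [fold_filter, (fold_closed _ (by intro p hp; simpa using (List.mem_filter.mp hp).2) 0).1]
  simp only [lineCount, runStarts_eq, endB]
  rcases h : line.filter (fun p => p == 0 || p == 255) with _ | ⟨y, u⟩
  · simp [runsR]
  · simp only [ne_eq, reduceCtorEq, not_false_iff, true_and]
    ring_nf


-- the j-counter loops: fold with an incrementing second component = fold of stepA over the indexed line
lemma fold_j (f : Nat → Int → Int) : ∀ (n : Nat) (c st j0 : Int),
    ((List.range n).foldl (fun sj k => (stepA sj.1 (f k sj.2), sj.2 + 1)) ((c, st), j0))
      = (((List.range n).map (fun k => f k (j0 + k))).foldl stepA (c, st), j0 + n) := by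
  intro n
  induction n with
  | zero => intro c st j0; simp
  | succ m ih =>
    intro c st j0
    rw [List.range_succ, List.foldl_append, List.map_append, List.foldl_append, ih]
    simp
    ring

-- ===== VERDICT (by name: the statement is the Claim_ definition above) =====
theorem crossings_spec : Claim_equal_crossings := by
  intro img _ _
  show crossings img = crossings_alt img
  unfold crossings crossings_alt
  simp only [PySem.List.pyRange_one, PySem.List.pyRange_neg_one, List.foldl_map, List.map_map,
    List.map_cons, List.map_nil]
  rw [fold_j, fold_j]
  simp only [List.cons.injEq, and_true]
  refine ⟨?_, ?_, ?_, ?_⟩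
  · rw [line_eq]
    simp only [List.foldl_map, Function.comp]
  · rw [line_eq]
    simp only [List.foldl_map, Function.comp]
  · rw [line_eq]
    simp only [List.foldl_map, Function.comp]
  · rw [line_eq]
    simp only [List.foldl_map, Function.comp]
    have hn : ((↑img.length - 1 : Int) - (-1)).toNat = ((↑img.length : Int) - 0).toNat := by omega
    rw [hn]
    refine congrArg Prod.fst (List.foldl_ext _ _ _ (fun s k _ => ?_))
    congr 2
    ring
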